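-- pv_equiv track=rewrite | github.com/JoseTorres99/big-data-mining | Project_1_temp/classwork/build_tableB.py | sniff_rt_columns
-- ===== SOURCE A (Python) =====
-- def sniff_rt_columns(fieldnames):
--     # Try common variations. We only need title, release date/year, critic score.
--     f = { (name or "").strip().lower(): name for name in (fieldnames or []) }
--
--     def pick(*cands):
--         for c in cands:
--             if c in f:
--                 return f[c]
--         return ""
--
--     col_title = pick("title", "movie_title", "movie", "name")
--     col_release = pick("release_date", "releasedate", "release", "release year", "year", "release_year", "date")
--     col_critic = pick("critic_score", "critics_score", "tomatometer", "tomatometer_score", "critics rating", "critics_rating", "critic rating")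
--
--     return col_title, col_release, col_critic
-- ===== SOURCE B (Python) =====
-- def sniff_rt_columns(fieldnames):
--     # Single-pass, dict-free: for each of the three column roles keep the best
--     # (candidate-rank, original name) seen so far while scanning fieldnames once;
--     # ties on rank are overwritten so the LAST matching field wins, lower rank =
--     # higher-precedence candidate.
--     GROUPS = (
--         ("title", "movie_title", "movie", "name"),
--         ("release_date", "releasedate", "release", "release year", "year", "release_year", "date"),
--         ("critic_score", "critics_score", "tomatometer", "tomatometer_score", "critics rating", "critics_rating", "critic rating"),
--     )
--     best = [None, None, None]  # per group: (rank, original name) or None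
--     for name in (fieldnames or []):
--         key = (name or "").strip().lower()
--         for i, group in enumerate(GROUPS):
--             if key in group:
--                 r = group.index(key)
--                 if best[i] is None or r <= best[i][0]:
--                     best[i] = (r, name)
--     return tuple(b[1] if b is not None else "" for b in best)
-- ===== Notes on version B (the rewrite author's own statement) =====
-- stated objective: alternative
-- what changed: Instead of building a normalized-name dict and probing it per candidate, B makes a single pass over fieldnames keeping, for each of the three column roles, the best (candidate-rank, name) accumulator; ties on rank are overwritten so the last matching field wins, matching A's dict overwrite.
import Mathlib
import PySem

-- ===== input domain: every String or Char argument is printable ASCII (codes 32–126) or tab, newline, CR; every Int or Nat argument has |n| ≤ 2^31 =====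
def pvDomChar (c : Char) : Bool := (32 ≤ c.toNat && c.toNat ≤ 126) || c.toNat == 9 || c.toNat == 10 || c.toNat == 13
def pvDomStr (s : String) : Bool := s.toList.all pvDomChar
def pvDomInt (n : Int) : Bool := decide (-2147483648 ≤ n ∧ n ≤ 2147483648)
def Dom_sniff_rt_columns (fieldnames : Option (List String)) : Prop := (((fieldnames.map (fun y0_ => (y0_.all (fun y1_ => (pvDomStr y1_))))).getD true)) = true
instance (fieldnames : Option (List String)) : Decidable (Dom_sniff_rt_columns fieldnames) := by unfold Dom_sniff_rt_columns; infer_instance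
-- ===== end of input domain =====

-- B drops A's normalized-key dict and per-candidate lookups for a single pass over
-- fieldnames keeping, per column role, the best (candidate-rank, name) seen so far.

-- (name or "").strip().lower() — for a string, `name or ""` is `name` when nonempty and `""` otherwise, so it is the identity here
def pvNorm (name : String) : String := PySem.Str.lower (PySem.Str.strip name)

-- ===== PORT A =====
-- the dict comprehension { norm(name): name for name in (fieldnames or []) }
def pvBuildF (fieldnames : Option (List String)) : PySem.Dict String String :=
  (fieldnames.getD []).foldl (fun d name => d.insert (pvNorm name) name) PySem.Dict.empty

-- def pick(*cands): for c in cands: if c in f: return f[c]; return ""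
def pvPickA (f : PySem.Dict String String) : List String → String
  | [] => ""
  | c :: rest =>
    match f.get? c with
    | some v => v
    | none => pvPickA f rest

def sniff_rt_columns (fieldnames : Option (List String)) : String × String × String :=
  let f := pvBuildF fieldnames
  let col_title := pvPickA f ["title", "movie_title", "movie", "name"]
  let col_release := pvPickA f ["release_date", "releasedate", "release", "release year", "year", "release_year", "date"]
  let col_critic := pvPickA f ["critic_score", "critics_score", "tomatometer", "tomatometer_score", "critics rating", "critics_rating", "critic rating"]
  (col_title, col_release, col_critic)

-- ===== PORT B =====
-- `key in group` / `group.index(key)`: first index of key in the candidate group, if any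
def pvRank (key : String) : List String → Option Nat
  | [] => none
  | c :: rest => if key = c then some 0 else (pvRank key rest).map (· + 1)

-- the body of B's inner update: keep (rank, name); ties overwritten so the last field wins
def pvUpd (cands : List String) (st : Option (Nat × String)) (name : String) : Option (Nat × String) :=
  match pvRank (pvNorm name) cands with
  | some r =>
    match st with
    | none => some (r, name)
    | some (r0, _) => if r ≤ r0 then some (r, name) else st
  | none => st

def pvG1 : List String := ["title", "movie_title", "movie", "name"]
def pvG2 : List String := ["release_date", "releasedate", "release", "release year", "year", "release_year", "date"]
def pvG3 : List String := ["critic_score", "critics_score", "tomatometer", "tomatometer_score", "critics rating", "critics_rating", "critic rating"]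

def sniff_rt_columns_alt (fieldnames : Option (List String)) : String × String × String :=
  let best := (fieldnames.getD []).foldl
    (fun (s : Option (Nat × String) × Option (Nat × String) × Option (Nat × String)) name =>
      (pvUpd pvG1 s.1 name, pvUpd pvG2 s.2.1 name, pvUpd pvG3 s.2.2 name))
    (none, none, none)
  ((best.1.map Prod.snd).getD "", (best.2.1.map Prod.snd).getD "", (best.2.2.map Prod.snd).getD "")

-- ===== PRECONDITION & SPEC =====
def Spec_sniff_rt_columns (fieldnames : Option (List String)) (out : String × String × String) : Prop := out = sniff_rt_columns_alt fieldnames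
instance (fieldnames : Option (List String)) (out : String × String × String) : Decidable (Spec_sniff_rt_columns fieldnames out) := by unfold Spec_sniff_rt_columns; infer_instance

-- ===== CLAIM (what is proved, stated in full; the proofs are below) =====
def Claim_equal_sniff_rt_columns : Prop := ∀ (fieldnames : Option (List String)), Dom_sniff_rt_columns fieldnames → Spec_sniff_rt_columns fieldnames (sniff_rt_columns fieldnames)

-- ===== LEMMAS AND PROOFS =====

-- intermediate characterization: first candidate (by index, offset k) that some field normalizes to, together with the LAST such field
def pickIdx (names : List String) : List String → Nat → Option (Nat × String)
  | [], _ => none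
  | c :: rest, k =>
    match names.reverse.find? (fun name => pvNorm name == c) with
    | some v => some (k, v)
    | none => pickIdx names rest (k + 1)

theorem pickIdx_nil (cands : List String) (k : Nat) : pickIdx [] cands k = none := by
  induction cands generalizing k with
  | nil => rfl
  | cons c rest ih => simp [pickIdx, ih]

theorem pickIdx_ge (names cands : List String) (k : Nat) (r : Nat) (v : String)
    (h : pickIdx names cands k = some (r, v)) : k ≤ r := by
  induction cands generalizing k with
  | nil => simp [pickIdx] at h
  | cons c rest ih =>
    simp only [pickIdx] at h
    cases hf : names.reverse.find? (fun name => pvNorm name == c) with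
    | some w => rw [hf] at h; simp at h; omega
    | none => rw [hf] at h; have := ih (k + 1) h; omega

theorem pickIdx_snoc (ns : List String) (n : String) (cands : List String) (k : Nat) :
    pickIdx (ns ++ [n]) cands k =
      (match pvRank (pvNorm n) cands with
       | some j =>
         match pickIdx ns cands k with
         | none => some (k + j, n)
         | some (r0, v0) => if k + j ≤ r0 then some (k + j, n) else some (r0, v0)
       | none => pickIdx ns cands k) := by
  induction cands generalizing k with
  | nil => simp [pickIdx, pvRank]
  | cons c rest ih =>
    by_cases hc : pvNorm n = c
    · -- rank is 0; the snoc'ed name is found first in the reversed list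
      subst hc
      simp only [pickIdx, pvRank, List.reverse_append, List.reverse_singleton,
        List.singleton_append, List.find?_cons, beq_self_eq_true]
      cases hf : ns.reverse.find? (fun name => pvNorm name == pvNorm n) with
      | some v => simp
      | none =>
        cases hp : pickIdx ns rest (k + 1) with
        | none => simp
        | some rv =>
          obtain ⟨r0, v0⟩ := rv
          have hge := pickIdx_ge ns rest (k + 1) r0 v0 hp
          simp [show k ≤ r0 by omega]
    · have hbeq : (pvNorm n == c) = false := by simpa using hc
      simp only [pickIdx, pvRank, if_neg hc, List.reverse_append, List.reverse_singleton,
        List.singleton_append, List.find?_cons, hbeq]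
      cases hf : ns.reverse.find? (fun name => pvNorm name == c) with
      | some v =>
        -- old head match wins: any rank of n is ≥ 1, so k + rank ≤ k is false
        cases hr : pvRank (pvNorm n) rest with
        | none => simp
        | some j =>
          simp only [Option.map_some]
          rw [if_neg (by omega)]
      | none =>
        rw [ih (k + 1)]
        cases hr : pvRank (pvNorm n) rest with
        | none => simp
        | some j =>
          simp only [Option.map_some]
          have h1 : k + 1 + j = k + (j + 1) := by omega
          cases hp : pickIdx ns rest (k + 1) with
          | none => rw [h1]
          | some rv =>
            obtain ⟨r0, v0⟩ := rv
            rw [h1]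

-- B's left fold computes pickIdx over the full candidate list
theorem foldl_upd_eq_pickIdx (cands : List String) (ns : List String) :
    ns.foldl (pvUpd cands) none = pickIdx ns cands 0 := by
  induction ns using List.reverseRecOn with
  | nil => rw [pickIdx_nil]; rfl
  | append_singleton ns n ih =>
    rw [List.foldl_append, List.foldl_cons, List.foldl_nil, ih, pickIdx_snoc]
    unfold pvUpd
    cases hr : pvRank (pvNorm n) cands with
    | none => simp
    | some j =>
      cases hp : pickIdx ns cands 0 with
      | none => simp
      | some rv => obtain ⟨r0, v0⟩ := rv; simp

-- per-candidate reversed scan (last match wins), the shape A's dict lookups reduce to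
def pvPickRev (names : List String) : List String → String
  | [] => ""
  | c :: rest =>
    match names.reverse.find? (fun name => pvNorm name == c) with
    | some v => v
    | none => pvPickRev names rest

theorem pickRev_eq_pickIdx (names cands : List String) (k : Nat) :
    pvPickRev names cands = ((pickIdx names cands k).map Prod.snd).getD "" := by
  induction cands generalizing k with
  | nil => rfl
  | cons c rest ih =>
    simp only [pvPickRev, pickIdx]
    cases hf : names.reverse.find? (fun name => pvNorm name == c) with
    | some v => simp
    | none => simpa using ih (k + 1)

-- the dict built by A answers lookups as the reversed scan does (last inserted wins)
theorem pvGet_foldl_insert (fs : List String) (d : PySem.Dict String String) (c : String) :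
    ((fs.foldl (fun d name => d.insert (pvNorm name) name) d).get? c) =
      (fs.reverse.find? (fun name => pvNorm name == c)).or (d.get? c) := by
  induction fs generalizing d with
  | nil => simp
  | cons n rest ih =>
    simp only [List.foldl_cons, List.reverse_cons, List.find?_append, ih]
    cases h : rest.reverse.find? (fun name => pvNorm name == c) with
    | some v => simp
    | none =>
      simp only [Option.none_or, List.find?]
      rw [PySem.Dict.get?_insert]
      by_cases hc : c = pvNorm n
      · simp [hc]
      · have : (pvNorm n == c) = false := by
          simp; exact fun e => hc e.symm
        simp [hc, this]

theorem pvPickA_eq (fieldnames : Option (List String)) (cands : List String) :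
    pvPickA (pvBuildF fieldnames) cands = pvPickRev (fieldnames.getD []) cands := by
  induction cands with
  | nil => rfl
  | cons c rest ih =>
    simp only [pvPickA, pvPickRev, pvBuildF]
    rw [pvGet_foldl_insert]
    cases h : (fieldnames.getD []).reverse.find? (fun name => pvNorm name == c) with
    | some v => simp
    | none =>
      simp only [Option.none_or, PySem.Dict.get?_empty]
      simpa [pvBuildF] using ih

-- the componentwise triple fold splits into three independent folds
theorem foldl_triple {α β γ δ : Type} (f : α → δ → α) (g : β → δ → β) (h : γ → δ → γ)
    (ns : List δ) (a : α) (b : β) (c : γ) :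
    ns.foldl (fun (s : α × β × γ) n => (f s.1 n, g s.2.1 n, h s.2.2 n)) (a, b, c)
      = (ns.foldl f a, ns.foldl g b, ns.foldl h c) := by
  induction ns generalizing a b c with
  | nil => rfl
  | cons n rest ih => simp [List.foldl_cons, ih]

theorem pick_component (fieldnames : Option (List String)) (cands : List String) :
    pvPickA (pvBuildF fieldnames) cands
      = (((fieldnames.getD []).foldl (pvUpd cands) none).map Prod.snd).getD "" := by
  rw [pvPickA_eq, foldl_upd_eq_pickIdx, pickRev_eq_pickIdx (fieldnames.getD []) cands 0]

-- ===== VERDICT (by name: the statement is the Claim_ definition above) =====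
theorem sniff_rt_columns_spec : Claim_equal_sniff_rt_columns := by
  intro fieldnames _
  unfold Spec_sniff_rt_columns sniff_rt_columns sniff_rt_columns_alt
  simp only [pvG1, pvG2, pvG3]
  rw [foldl_triple]
  simp only [pick_component]
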